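-- pv_equiv track=rewrite | github.com/nlpsoc/Tokenization-Language-Variation | src/styletokenizer/logistic_regression.py | count_unique_strings
-- ===== SOURCE A (Python) =====
-- from collections import Counter
-- from typing import List, Dict, Tuple
--
-- def count_unique_strings(list1: List[str], list2: List[str]) -> Dict[str, int]:
--     """
--         given list of strings, return the count of unique strings in list1 and list2
--             only if they are unique to one list
--     :param list1:
--     :param list2:
--     :return:
--     """
--     # Convert lists to sets
--     set1 = set(list1)
--     set2 = set(list2)
--
--     # Find the symmetric difference
--     unique_strings = set1.symmetric_difference(set2)
--
--     # Count occurrences in the original lists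
--     count1 = Counter(list1)
--     count2 = Counter(list2)
--
--     result = {}
--     # Add counts
--     for string in unique_strings:
--         if string in count1:
--             result[string] = count1[string]
--         elif string in count2:
--             result[string] = count2[string]
--         else:
--             raise ValueError(f"Something went wrong. String {string} not in either list")
--     return result
-- ===== SOURCE B (Python) =====
-- def count_unique_strings(list1, list2):
--     # One merged pass: a single dict of (count-in-list1, count-in-list2) pairs,
--     # then keep the keys whose pair has a zero component. No Counter, no sets,
--     # no symmetric difference.
--     pair = {}
--     for s in list1:
--         c1, c2 = pair.get(s, (0, 0))
--         pair[s] = (c1 + 1, c2)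
--     for s in list2:
--         c1, c2 = pair.get(s, (0, 0))
--         pair[s] = (c1, c2 + 1)
--     return {s: c1 + c2 for s, (c1, c2) in pair.items() if c1 == 0 or c2 == 0}
-- ===== Notes on version B (the rewrite author's own statement) =====
-- stated objective: alternative
-- what changed: B replaces A's sets/Counters/symmetric-difference pipeline by a single dict of (count-in-list1, count-in-list2) pairs built in one merged pass over both lists, emitting the keys whose pair has a zero component.
import Mathlib
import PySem

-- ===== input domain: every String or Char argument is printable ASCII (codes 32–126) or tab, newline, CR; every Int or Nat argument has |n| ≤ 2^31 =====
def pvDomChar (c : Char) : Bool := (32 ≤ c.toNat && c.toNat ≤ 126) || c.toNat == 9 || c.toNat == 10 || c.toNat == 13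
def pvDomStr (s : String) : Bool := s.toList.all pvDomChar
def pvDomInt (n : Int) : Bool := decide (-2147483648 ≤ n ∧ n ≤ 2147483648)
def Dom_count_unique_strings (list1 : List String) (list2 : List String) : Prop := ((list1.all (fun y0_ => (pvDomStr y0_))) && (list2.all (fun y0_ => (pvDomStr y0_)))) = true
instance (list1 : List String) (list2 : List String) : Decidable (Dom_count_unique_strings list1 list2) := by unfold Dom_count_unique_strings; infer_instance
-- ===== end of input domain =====

-- B replaces A's sets/Counters/symmetric-difference pipeline by one merged pass
-- building a single dict of (count-in-list1, count-in-list2) pairs (objective: alternative).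


-- ===== PORT A =====
def count_unique_strings (list1 : List String) (list2 : List String) : List (String × Int) :=
  let set1 : PySem.Set String := PySem.Set.ofList list1
  let set2 : PySem.Set String := PySem.Set.ofList list2
  let unique_strings : PySem.Set String := PySem.Set.symmDiff set1 set2
  let count1 : PySem.Dict String Int := PySem.Dict.counter list1
  let count2 : PySem.Dict String Int := PySem.Dict.counter list2
  (unique_strings.foldl (fun (result : PySem.Dict String Int) s =>
      if count1.contains s then result.insert s (count1.getD s 0)
      else if count2.contains s then result.insert s (count2.getD s 0)
      else result  -- the 'raise ValueError' branch: unreachable, an element of the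
                   -- symmetric difference is always a key of count1 or count2
    ) PySem.Dict.empty).items

-- ===== PORT B =====
def count_unique_strings_alt (list1 : List String) (list2 : List String) : List (String × Int) :=
  let pair1 : PySem.Dict String (Int × Int) :=
    list1.foldl (fun d s => d.insert s ((d.getD s (0, 0)).1 + 1, (d.getD s (0, 0)).2))
      PySem.Dict.empty
  let pair : PySem.Dict String (Int × Int) :=
    list2.foldl (fun d s => d.insert s ((d.getD s (0, 0)).1, (d.getD s (0, 0)).2 + 1))
      pair1
  pair.items.filterMap (fun q =>
    if q.2.1 == 0 || q.2.2 == 0 then some (q.1, q.2.1 + q.2.2) else none)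

-- ===== PRECONDITION & SPEC =====
def Spec_count_unique_strings (list1 : List String) (list2 : List String) (out : List (String × Int)) : Prop := out = count_unique_strings_alt list1 list2
instance (list1 : List String) (list2 : List String) (out : List (String × Int)) : Decidable (Spec_count_unique_strings list1 list2 out) := by unfold Spec_count_unique_strings; infer_instance

-- ===== CLAIM (what is proved, stated in full; the proofs are below) =====
def Claim_equal_count_unique_strings : Prop := ∀ (list1 : List String) (list2 : List String), Dom_count_unique_strings list1 list2 → Spec_count_unique_strings list1 list2 (count_unique_strings list1 list2)

-- ===== LEMMAS AND PROOFS =====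

theorem filterMap_eq_map_of {α β : Type} (l : List α) (g : α → Option β) (f : α → β)
    (h : ∀ x ∈ l, g x = some (f x)) : l.filterMap g = l.map f := by
  induction l with
  | nil => rfl
  | cons x xs ih =>
    rw [List.filterMap_cons, h x (by simp), List.map_cons,
      ih (fun y hy => h y (by simp [hy]))]

theorem filterMap_eq_map_filter_of {α β : Type} (l : List α) (g : α → Option β)
    (p : α → Bool) (f : α → β)
    (h : ∀ x ∈ l, g x = if p x then some (f x) else none) :
    l.filterMap g = (l.filter p).map f := by
  induction l with
  | nil => rfl
  | cons x xs ih =>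
    rw [List.filterMap_cons, h x (by simp), List.filter_cons]
    cases hp : p x <;>
      simp [hp, ih (fun y hy => h y (by simp [hy]))]

-- the common normal form both ports are reduced to
def cusNF (l1 l2 : List String) : List (String × Int) :=
  ((PySem.Set.ofList l1).filter (fun s => !(PySem.Set.contains (PySem.Set.ofList l2) s))).map
      (fun k => (k, (l1.count k : Int))) ++
  ((PySem.Set.ofList l2).filter (fun s => !(PySem.Set.contains (PySem.Set.ofList l1) s))).map
      (fun k => (k, (l2.count k : Int)))

theorem getD_fold1 (l : List String) (d : PySem.Dict String (Int × Int)) (s : String) :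
    (l.foldl (fun d s => d.insert s ((d.getD s (0, 0)).1 + 1, (d.getD s (0, 0)).2)) d).getD s (0, 0)
      = ((d.getD s (0, 0)).1 + l.count s, (d.getD s (0, 0)).2) := by
  induction l generalizing d with
  | nil => simp
  | cons x xs ih =>
    rw [List.foldl_cons, ih, PySem.Dict.getD_insert]
    by_cases hx : s = x
    · subst hx; simp [List.count_cons_self]; ring
    · have hxs : ¬ x = s := fun h => hx h.symm
      simp [hx, hxs, List.count_cons]

theorem getD_fold2 (l : List String) (d : PySem.Dict String (Int × Int)) (s : String) :
    (l.foldl (fun d s => d.insert s ((d.getD s (0, 0)).1, (d.getD s (0, 0)).2 + 1)) d).getD s (0, 0)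
      = ((d.getD s (0, 0)).1, (d.getD s (0, 0)).2 + l.count s) := by
  induction l generalizing d with
  | nil => simp
  | cons x xs ih =>
    rw [List.foldl_cons, ih, PySem.Dict.getD_insert]
    by_cases hx : s = x
    · subst hx; simp [List.count_cons_self]; ring
    · have hxs : ¬ x = s := fun h => hx h.symm
      simp [hx, hxs, List.count_cons]

theorem alt_eq_nf (l1 l2 : List String) : count_unique_strings_alt l1 l2 = cusNF l1 l2 := by
  unfold count_unique_strings_alt
  simp only
  set F1 := (fun (d : PySem.Dict String (Int × Int)) s =>
    d.insert s ((d.getD s (0, 0)).1 + 1, (d.getD s (0, 0)).2)) with hF1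
  set F2 := (fun (d : PySem.Dict String (Int × Int)) s =>
    d.insert s ((d.getD s (0, 0)).1, (d.getD s (0, 0)).2 + 1)) with hF2
  set d := l2.foldl F2 (l1.foldl F1 PySem.Dict.empty) with hd
  have hnd : d.keys.Nodup := by
    rw [hd]
    exact PySem.Dict.nodup_keys_foldl_insert _ _ _
      (PySem.Dict.nodup_keys_foldl_insert _ _ _ PySem.Dict.nodup_keys_empty)
  have hkeys : d.keys = PySem.Set.update (PySem.Set.ofList l1) l2 := by
    rw [hd, hF2, PySem.Dict.keys_foldl_insert, hF1, PySem.Dict.keys_foldl_insert]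
    rw [show PySem.Dict.empty.keys = ([] : List String) from rfl,
      PySem.Set.update_nil_left]
  have hget : ∀ s, d.getD s (0, 0) = ((l1.count s : Int), (l2.count s : Int)) := by
    intro s
    rw [hd, hF2, getD_fold2, hF1, getD_fold1]
    simp [PySem.Dict.getD_empty]
  rw [PySem.Dict.items_eq_map_keys d hnd (0, 0), List.filterMap_map, hkeys,
    PySem.Set.update_eq_append_filter, List.filterMap_append]
  unfold cusNF
  congr 1
  · apply filterMap_eq_map_filter_of
    intro k hk
    have hk1 : k ∈ l1 := (PySem.Set.mem_ofList l1 k).1 hk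
    have hc1 : l1.count k ≠ 0 := by
      simpa [List.count_eq_zero] using hk1
    simp only [Function.comp, hget k]
    by_cases h2 : k ∈ l2
    · have : l2.count k ≠ 0 := by simpa [List.count_eq_zero] using h2
      simp [hc1, this, List.contains_iff_mem, h2]
    · have hz : l2.count k = 0 := List.count_eq_zero.2 h2
      simp [hz, List.contains_iff_mem, h2]
  · apply filterMap_eq_map_of
    intro k hk
    simp only [List.mem_filter, Bool.not_eq_eq_eq_not, Bool.not_true] at hk
    have hk2 : k ∈ l2 := (PySem.Set.mem_ofList l2 k).1 hk.1
    have hk1 : k ∉ l1 := by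
      intro h
      have hc : (PySem.Set.ofList l1).contains k = true :=
        List.contains_iff_mem.mpr ((PySem.Set.mem_ofList l1 k).2 h)
      rw [hk.2] at hc
      exact Bool.false_ne_true hc
    have hz : l1.count k = 0 := List.count_eq_zero.2 hk1
    have hc2 : l2.count k ≠ 0 := by simpa [List.count_eq_zero] using hk2
    simp [Function.comp, hget k, hz]

theorem a_eq_nf (l1 l2 : List String) : count_unique_strings l1 l2 = cusNF l1 l2 := by
  unfold count_unique_strings
  simp only
  set S1 := PySem.Set.ofList l1 with hS1
  set S2 := PySem.Set.ofList l2 with hS2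
  have hmem1 : ∀ s, s ∈ S1 ↔ s ∈ l1 := fun s => PySem.Set.mem_ofList l1 s
  have hmem2 : ∀ s, s ∈ S2 ↔ s ∈ l2 := fun s => PySem.Set.mem_ofList l2 s
  rw [PySem.List.foldl_congr_mem (PySem.Set.symmDiff S1 S2) _
      (fun (result : PySem.Dict String Int) s =>
        result.insert s (if l1.contains s then ((l1.count s : Int)) else ((l2.count s : Int))))
      PySem.Dict.empty ?_]
  · rw [show (fun (result : PySem.Dict String Int) s =>
        result.insert s (if l1.contains s then ((l1.count s : Int)) else ((l2.count s : Int)))) =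
        (fun (result : PySem.Dict String Int) s =>
        result.insert (id s) ((fun s => if l1.contains s then ((l1.count s : Int)) else ((l2.count s : Int))) s)) from rfl]
    rw [PySem.Dict.items_foldl_insert_fresh _ id _ PySem.Dict.empty
        (fun a _ => PySem.Dict.contains_empty a) ?nd]
    case nd =>
      simp only [List.map_id]
      apply List.Nodup.append
      · exact (PySem.Set.nodup_ofList l1).filter _
      · exact (PySem.Set.nodup_ofList l2).filter _
      · intro x hx hx2
        simp only [PySem.Set.diff, List.mem_filter, PySem.Set.contains] at hx hx2
        simp [hx2.1] at hx
    rw [show PySem.Dict.empty.items = ([] : List (String × Int)) from rfl, List.nil_append]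
    simp only [PySem.Set.symmDiff, PySem.Set.diff, List.map_append]
    unfold cusNF
    rw [← hS1, ← hS2]
    congr 1
    · apply List.map_congr_left
      intro s hs
      simp only [List.mem_filter] at hs
      have m1 : s ∈ l1 := (hmem1 s).1 hs.1
      simp [m1]
    · apply List.map_congr_left
      intro s hs
      simp only [List.mem_filter] at hs
      have nm1 : s ∉ l1 := by
        intro h
        simp at hs
        exact hs.2 ((hmem1 s).2 h)
      simp [nm1]
  · intro acc s hs
    simp only [PySem.Set.symmDiff, PySem.Set.diff, List.mem_append, List.mem_filter,
      PySem.Set.contains] at hs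
    rcases hs with ⟨hs1, hns2⟩ | ⟨hs2, hns1⟩
    · have m1 : s ∈ l1 := (hmem1 s).1 hs1
      simp [PySem.Dict.contains_counter, PySem.Dict.getD_counter, m1,
        List.contains_iff_mem]
    · have nm1 : s ∉ l1 := fun h => (by simpa using hns1 : s ∉ S1) ((hmem1 s).2 h)
      have m2 : s ∈ l2 := (hmem2 s).1 hs2
      simp [PySem.Dict.contains_counter, PySem.Dict.getD_counter, nm1, m2,
        List.contains_iff_mem]

-- ===== VERDICT (by name: the statement is the Claim_ definition above) =====
theorem count_unique_strings_spec : Claim_equal_count_unique_strings := by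
  intro l1 l2 _
  unfold Spec_count_unique_strings
  rw [a_eq_nf, alt_eq_nf]
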